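-- pv_equiv track=rewrite | github.com/tjl0005/Santorini-Boardgame | Code/minimax.py | matchLevel
-- ===== SOURCE A (Python) =====
-- def matchLevel(levels):
--     """Produce score depending upon building/worker level"""
--     score = 0
--     for level in levels:
--         match level:
--             case 1:
--                 score += 40
--             case 2:
--                 score += 60
--             case 3:
--                 score += 1000
--             case _:
--                 score += 0
--     return score
-- ===== SOURCE B (Python) =====
-- def matchLevel(levels):
--     """Produce score depending upon building/worker level"""
--     n = len(levels)
--     if n == 0:
--         return 0
--     if n == 1:
--         level = levels[0]
--         return 40 if level == 1 else 60 if level == 2 else 1000 if level == 3 else 0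
--     mid = n // 2
--     return matchLevel(levels[:mid]) + matchLevel(levels[mid:])
-- ===== Notes on version B (the rewrite author's own statement) =====
-- stated objective: alternative
-- what changed: B scores the list by recursive divide-and-conquer: split at the midpoint, score each half recursively, add the two sub-scores, with single-element base cases giving the weight; A is a single iterative pass with a match-accumulator.
import Mathlib
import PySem

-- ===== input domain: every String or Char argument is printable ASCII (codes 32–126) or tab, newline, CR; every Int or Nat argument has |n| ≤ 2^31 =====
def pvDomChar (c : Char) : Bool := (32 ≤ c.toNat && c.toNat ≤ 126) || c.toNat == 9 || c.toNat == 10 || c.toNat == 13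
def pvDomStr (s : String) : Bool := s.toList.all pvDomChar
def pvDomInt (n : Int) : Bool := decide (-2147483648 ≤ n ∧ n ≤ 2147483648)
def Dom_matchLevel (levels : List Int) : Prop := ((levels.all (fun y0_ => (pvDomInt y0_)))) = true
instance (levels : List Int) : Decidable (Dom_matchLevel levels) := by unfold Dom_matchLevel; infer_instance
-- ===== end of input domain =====

-- B scores by recursive divide-and-conquer (split at the midpoint, add the halves' scores) instead of A's single iterative match-accumulator pass; same cost, different decomposition.

-- ===== PORT A =====
-- Port of A: per-element accumulation with a match on the level.
def matchLevel (levels : List Int) : Int :=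
  levels.foldl (fun score level =>
    match level with
    | 1 => score + 40
    | 2 => score + 60
    | 3 => score + 1000
    | _ => score + 0) 0

-- ===== PORT B =====
-- Port of B: divide and conquer; levels[:mid] / levels[mid:] become take/drop at mid = n/2
-- (exact: for 0 ≤ mid ≤ n these Python slices are take/drop).
def matchLevel_alt (levels : List Int) : Int :=
  match h : levels with
  | [] => 0
  | [level] => if level = 1 then 40 else if level = 2 then 60 else if level = 3 then 1000 else 0
  | _ :: _ :: _ =>
    matchLevel_alt (levels.take (levels.length / 2)) +
    matchLevel_alt (levels.drop (levels.length / 2))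
  termination_by levels.length
  decreasing_by
    · simp [h]; omega
    · simp [h]; omega

-- ===== PRECONDITION & SPEC =====
def Spec_matchLevel (levels : List Int) (out : Int) : Prop := out = matchLevel_alt levels
instance (levels : List Int) (out : Int) : Decidable (Spec_matchLevel levels out) := by unfold Spec_matchLevel; infer_instance

-- ===== CLAIM (what is proved, stated in full; the proofs are below) =====
def Claim_equal_matchLevel : Prop := ∀ (levels : List Int), Dom_matchLevel levels → Spec_matchLevel levels (matchLevel levels)

-- ===== LEMMAS AND PROOFS =====
-- the per-level weight both programs realise
def pvWeight (level : Int) : Int :=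
  if level = 1 then 40 else if level = 2 then 60 else if level = 3 then 1000 else 0

theorem matchLevel_foldl (levels : List Int) (s : Int) :
    levels.foldl (fun score level =>
      match level with
      | 1 => score + 40
      | 2 => score + 60
      | 3 => score + 1000
      | _ => score + 0) s
    = s + (levels.map pvWeight).sum := by
  induction levels generalizing s with
  | nil => simp
  | cons x xs ih =>
    simp only [List.foldl_cons, ih, List.map_cons, List.sum_cons]
    by_cases h1 : x = 1 <;> by_cases h2 : x = 2 <;> by_cases h3 : x = 3 <;>
      simp_all [pvWeight] <;> ring

theorem matchLevel_alt_sum (levels : List Int) :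
    matchLevel_alt levels = (levels.map pvWeight).sum := by
  induction levels using matchLevel_alt.induct with
  | case6 =>
    rw [matchLevel_alt]
    simp only [*]
    rw [← List.sum_append, ← List.map_append, List.take_append_drop]
  | _ => simp_all [matchLevel_alt, pvWeight]

-- ===== VERDICT (by name: the statement is the Claim_ definition above) =====
theorem matchLevel_spec : Claim_equal_matchLevel := by
  intro levels _
  show matchLevel levels = matchLevel_alt levels
  unfold matchLevel
  rw [matchLevel_foldl, matchLevel_alt_sum]
  ring
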